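-- pv_equiv track=rewrite | github.com/StarfighterLily/Nova-16 | nova_disassembler.py | find_loop_body
-- ===== SOURCE A (Python) =====
-- def find_loop_body(header_addr, back_edge_addr, control_flow):
--     """
--     Find all blocks that belong to a loop given the header and back edge.
--     """
--     body_blocks = set()
--     to_visit = [back_edge_addr]
--     visited = set()
--
--     while to_visit:
--         current = to_visit.pop(0)
--         if current in visited:
--             continue
--
--         visited.add(current)
--
--         # Add this block to the loop body
--         body_blocks.add(current)
--
--         # Add predecessors that are dominated by the header
--         # For simplicity, we'll include all blocks between header and back edge
--         if current >= header_addr: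
--             body_blocks.add(current)
--
--             # Add successors that are also in the loop
--             if current in control_flow['control_flow_graph']:
--                 for succ in control_flow['control_flow_graph'][current]:
--                     if succ >= header_addr and succ not in visited:
--                         to_visit.append(succ)
--
--     return sorted(list(body_blocks))
-- ===== SOURCE B (Python) =====
-- def find_loop_body(header_addr, back_edge_addr, control_flow):
--     """
--     Find all blocks that belong to a loop given the header and back edge.
--     Round-based fixpoint iteration instead of a worklist queue.
--     """
--     graph = control_flow.get('control_flow_graph', {})
--     rounds = len(graph) + sum(len(s) for s in graph.values()) + 1
--     body = {back_edge_addr}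
--     for _ in range(rounds):
--         new = {v for u in body if u >= header_addr
--                  for v in graph.get(u, [])
--                  if v >= header_addr and v not in body}
--         if not new:
--             break
--         body |= new
--     return sorted(body)
-- ===== Notes on version B (the rewrite author's own statement) =====
-- stated objective: alternative
-- what changed: A's BFS worklist (queue + visited set, popping one node at a time) is replaced by a round-based fixpoint iteration that repeatedly adds the whole frontier of gated successors of the current set until it stabilizes.
import Mathlib
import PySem

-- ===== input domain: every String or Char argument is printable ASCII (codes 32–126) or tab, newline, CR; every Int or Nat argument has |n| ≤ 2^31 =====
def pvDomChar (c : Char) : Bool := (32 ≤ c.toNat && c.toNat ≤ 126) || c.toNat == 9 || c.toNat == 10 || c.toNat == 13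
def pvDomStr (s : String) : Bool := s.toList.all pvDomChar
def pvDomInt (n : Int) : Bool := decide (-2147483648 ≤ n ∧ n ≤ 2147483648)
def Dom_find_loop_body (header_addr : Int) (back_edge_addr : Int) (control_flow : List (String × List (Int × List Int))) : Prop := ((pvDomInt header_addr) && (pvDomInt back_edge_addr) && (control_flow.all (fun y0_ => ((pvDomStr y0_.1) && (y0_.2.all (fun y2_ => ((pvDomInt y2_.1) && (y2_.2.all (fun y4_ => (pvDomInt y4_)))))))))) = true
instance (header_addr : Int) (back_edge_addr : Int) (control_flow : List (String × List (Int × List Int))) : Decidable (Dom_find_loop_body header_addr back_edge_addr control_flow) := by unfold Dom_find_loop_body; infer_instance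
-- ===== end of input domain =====

-- B replaces A's FIFO worklist/visited traversal by a round-based fixpoint iteration
-- (repeatedly add all gated successors of the current set until stable); objective: alternative.
-- Pre_ excludes exactly the inputs on which A raises KeyError ('control_flow_graph' key
-- absent and back_edge_addr >= header_addr); B returns [back_edge_addr] there.

-- ===== PORT A =====
-- shared primitive: Python dict access on the association list (first match), d.get(k) / d[k]
-- (exact: `List.lookup` is first-match, as dict lookup on the insertion-ordered items)

-- Finset of every successor value occurring in some adjacency list reachable by lookup
-- (used only for the termination measure of the worklist loop)
def flSuccs (g : List (Int × List Int)) : Finset Int :=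
  g.foldr (fun p acc => p.2.toFinset ∪ acc) ∅

theorem mem_flSuccs {g : List (Int × List Int)} {u v : Int}
    (h : v ∈ ((g.lookup u).getD [])) : v ∈ flSuccs g := by
  induction g with
  | nil => simp [List.lookup] at h
  | cons p rest ih =>
    obtain ⟨k, s⟩ := p
    by_cases hk : (u == k)
    · simp [List.lookup, hk] at h
      simp [flSuccs]
      exact Or.inl h
    · simp only [List.lookup, hk] at h
      simp [flSuccs]
      exact Or.inr (ih h)

theorem fl_card_lt {univ V : Finset Int} {c : Int} (hc : c ∈ univ) (hv : c ∉ V) :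
    (univ \ insert c V).card < (univ \ V).card := by
  apply Finset.card_lt_card
  rw [Finset.ssubset_iff_of_subset
    (Finset.sdiff_subset_sdiff (Finset.Subset.refl _) (Finset.subset_insert _ _))]
  exact ⟨c, Finset.mem_sdiff.mpr ⟨hc, hv⟩, by simp⟩

theorem fl_add_of_not_contains {s : List Int} {c : Int}
    (h : ¬ PySem.Set.contains s c = true) : PySem.Set.add s c = s ++ [c] := by
  have h' : c ∉ s := by simpa using h
  simp [PySem.Set.add, h']

-- the while-loop of A: state (body_blocks, visited, to_visit); pop(0) from the front,
-- append gated successors at the back.  univ/hg/hsub are proof-only arguments for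
-- termination (every element ever in to_visit lies in the finite set univ).
def flbLoop (header : Int) (g : List (Int × List Int)) (univ : Finset Int)
    (hg : ∀ u v : Int, v ∈ ((g.lookup u).getD []) → v ∈ univ)
    (body visited toVisit : List Int)
    (hsub : ∀ x ∈ toVisit, x ∈ univ) : List Int :=
  match toVisit with
  | [] => body
  | current :: rest =>
    if _hv : PySem.Set.contains visited current = true then
      flbLoop header g univ hg body visited rest
        (fun x hx => hsub x (List.mem_cons_of_mem _ hx))
    else
      if current ≥ header then
        if (g.lookup current).isSome then
          flbLoop header g univ hg
            (PySem.Set.add (PySem.Set.add body current) current)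
            (PySem.Set.add visited current)
            (rest ++ ((g.lookup current).getD []).filter
              (fun s => decide (s ≥ header) &&
                !(PySem.Set.contains (PySem.Set.add visited current) s)))
            (fun x hx => match List.mem_append.mp hx with
              | Or.inl h => hsub x (List.mem_cons_of_mem _ h)
              | Or.inr h => hg current x (List.mem_of_mem_filter h))
        else
          flbLoop header g univ hg
            (PySem.Set.add (PySem.Set.add body current) current)
            (PySem.Set.add visited current) rest
            (fun x hx => hsub x (List.mem_cons_of_mem _ hx))
      else
        flbLoop header g univ hg
          (PySem.Set.add body current)
          (PySem.Set.add visited current) rest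
          (fun x hx => hsub x (List.mem_cons_of_mem _ hx))
termination_by ((univ \ visited.toFinset).card, toVisit.length)
decreasing_by
  · exact Prod.Lex.right _ (Nat.lt_succ_self _)
  all_goals {
    apply Prod.Lex.left
    rw [fl_add_of_not_contains _hv]
    have hc : current ∈ univ := hsub current List.mem_cons_self
    have hnv : current ∉ visited.toFinset := by
      simp only [List.mem_toFinset]
      intro hmem
      exact _hv ((PySem.Set.contains_iff _ _).mpr hmem)
    have : (visited ++ [current]).toFinset = insert current visited.toFinset := by
      simp [List.toFinset_append]
    rw [this]
    exact fl_card_lt hc hnv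
  }

def find_loop_body (header_addr : Int) (back_edge_addr : Int) (control_flow : List (String × List (Int × List Int))) : List Int :=
  -- control_flow['control_flow_graph']: under Pre_ the KeyError inputs are excluded, so
  -- reading the graph once with default [] is exact (the graph is only consulted when the key exists)
  PySem.List.sorted
    (flbLoop header_addr ((control_flow.lookup "control_flow_graph").getD [])
      (insert back_edge_addr (flSuccs ((control_flow.lookup "control_flow_graph").getD [])))
      (fun u v hv => Finset.mem_insert_of_mem (mem_flSuccs hv))
      [] [] [back_edge_addr]
      (fun x hx => by
        rw [List.mem_singleton] at hx
        exact hx ▸ Finset.mem_insert_self _ _))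
    (fun x => x) false

-- ===== PORT B =====
-- one round: the set comprehension {v for u in body if u>=h for v in graph.get(u,[]) if v>=h and v not in body}
def flbNew (header : Int) (g : List (Int × List Int)) (body : List Int) : List Int :=
  PySem.Set.ofList
    ((body.filter (fun u => decide (u ≥ header))).flatMap
      (fun u => ((g.lookup u).getD []).filter
        (fun v => decide (v ≥ header) && !(PySem.Set.contains body v))))

-- the bounded for-loop with early break on an empty round
def flbIter (header : Int) (g : List (Int × List Int)) : Nat → List Int → List Int
  | 0, body => body
  | n + 1, body =>
    if (flbNew header g body).isEmpty then body
    else flbIter header g n (PySem.Set.union body (flbNew header g body))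

def find_loop_body_alt (header_addr : Int) (back_edge_addr : Int) (control_flow : List (String × List (Int × List Int))) : List Int :=
  PySem.List.sorted
    (flbIter header_addr ((control_flow.lookup "control_flow_graph").getD [])
      (((control_flow.lookup "control_flow_graph").getD []).length +
        ((((control_flow.lookup "control_flow_graph").getD []).map (fun p => p.2.length)).sum) + 1)
      (PySem.Set.ofList [back_edge_addr]))
    (fun x => x) false

-- ===== PRECONDITION & SPEC =====
-- Pre_ excludes exactly the inputs on which A raises KeyError: the key 'control_flow_graph'
-- is absent AND the traversal reaches the graph access (back_edge_addr >= header_addr).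
def Pre_find_loop_body (header_addr : Int) (back_edge_addr : Int) (control_flow : List (String × List (Int × List Int))) : Prop :=
  (control_flow.lookup "control_flow_graph").isSome = true ∨ back_edge_addr < header_addr
instance (header_addr : Int) (back_edge_addr : Int) (control_flow : List (String × List (Int × List Int))) : Decidable (Pre_find_loop_body header_addr back_edge_addr control_flow) := by unfold Pre_find_loop_body; infer_instance

def pvWitness_find_loop_body : Int × Int × (List (String × List (Int × List Int))) :=
  (2, 5, [("control_flow_graph", [(5, [6, 1]), (6, [5, 7])])])

def Spec_find_loop_body (header_addr : Int) (back_edge_addr : Int) (control_flow : List (String × List (Int × List Int))) (out : List Int) : Prop := out = find_loop_body_alt header_addr back_edge_addr control_flow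
instance (header_addr : Int) (back_edge_addr : Int) (control_flow : List (String × List (Int × List Int))) (out : List Int) : Decidable (Spec_find_loop_body header_addr back_edge_addr control_flow out) := by unfold Spec_find_loop_body; infer_instance

-- ===== CLAIM (what is proved, stated in full; the proofs are below) =====
def Claim_equal_find_loop_body : Prop := ∀ (header_addr : Int) (back_edge_addr : Int) (control_flow : List (String × List (Int × List Int))), Dom_find_loop_body header_addr back_edge_addr control_flow → Pre_find_loop_body header_addr back_edge_addr control_flow → Spec_find_loop_body header_addr back_edge_addr control_flow (find_loop_body header_addr back_edge_addr control_flow)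

-- ===== LEMMAS AND PROOFS =====

-- gated reachability: closure of S under "u ≥ header, v ∈ succs(u), v ≥ header"
inductive flReach (header : Int) (g : List (Int × List Int)) (S : Int → Prop) : Int → Prop
  | base {x : Int} : S x → flReach header g S x
  | step {u v : Int} : flReach header g S u → u ≥ header → v ≥ header →
      v ∈ ((g.lookup u).getD []) → flReach header g S v

theorem flReach_subset {header : Int} {g : List (Int × List Int)} {S T : Int → Prop}
    (hbase : ∀ x, S x → T x)
    (hclosed : ∀ u v, T u → u ≥ header → v ≥ header → v ∈ ((g.lookup u).getD []) → T v) :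
    ∀ x, flReach header g S x → T x := by
  intro x hx
  induction hx with
  | base h => exact hbase _ h
  | step hu hgu hgv hv ih => exact hclosed _ _ ih hgu hgv hv

theorem flReach_mono {header : Int} {g : List (Int × List Int)} {S S' : Int → Prop}
    (h : ∀ x, S x → S' x) : ∀ x, flReach header g S x → flReach header g S' x :=
  flReach_subset (fun x hx => .base (h x hx)) (fun _ _ hu hgu hgv hv => .step hu hgu hgv hv)

theorem flReach_congr {header : Int} {g : List (Int × List Int)} {S S' : Int → Prop}
    (h : ∀ x, S x ↔ S' x) : ∀ x, flReach header g S x ↔ flReach header g S' x :=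
  fun x => ⟨flReach_mono (fun y => (h y).mp) x, flReach_mono (fun y => (h y).mpr) x⟩

theorem flReach_absorb {header : Int} {g : List (Int × List Int)} {S T : Int → Prop}
    (hST : ∀ x, S x → T x) (hTS : ∀ x, T x → flReach header g S x) :
    ∀ x, flReach header g T x ↔ flReach header g S x :=
  fun x => ⟨flReach_subset hTS (fun _ _ hu hgu hgv hv => .step hu hgu hgv hv) x,
            flReach_mono hST x⟩

theorem fl_mem_add {s : List Int} {x y : Int} :
    y ∈ PySem.Set.add s x ↔ y ∈ s ∨ y = x := PySem.Set.mem_add s x y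

theorem fl_add_add (s : List Int) (x : Int) :
    PySem.Set.add (PySem.Set.add s x) x = PySem.Set.add s x := by
  by_cases hx : x ∈ s
  · simp [PySem.Set.add, hx]
  · simp [PySem.Set.add, hx]

theorem flbLoop_mem (header : Int) (g : List (Int × List Int)) (univ : Finset Int)
    (hg : ∀ u v : Int, v ∈ ((g.lookup u).getD []) → v ∈ univ)
    (body visited toVisit : List Int) (hsub : ∀ x ∈ toVisit, x ∈ univ) :
    body = visited →
    (∀ u ∈ visited, u ≥ header → ∀ v, v ≥ header → v ∈ ((g.lookup u).getD []) →
      (v ∈ visited ∨ v ∈ toVisit)) →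
    ∀ x, x ∈ flbLoop header g univ hg body visited toVisit hsub ↔
      flReach header g (fun y => y ∈ visited ∨ y ∈ toVisit) x := by
  fun_induction flbLoop header g univ hg body visited toVisit hsub with
  | case1 body visited hsub hsub2 =>
    intro hbv hinv x
    subst hbv
    constructor
    · exact fun hx => .base (Or.inl hx)
    · refine flReach_subset (T := fun y => y ∈ body) ?_ ?_ x
      · intro y hy; exact hy.resolve_right (by simp)
      · intro u v hu hgu hgv hv
        exact (hinv u hu hgu v hgv hv).resolve_right (by simp)
  | case2 body visited current rest hsub hv hsub2 ih =>
    intro hbv hinv x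
    have hcur : current ∈ visited := (PySem.Set.contains_iff _ _).mp hv
    have hinv' : ∀ u ∈ visited, u ≥ header → ∀ v, v ≥ header →
        v ∈ ((g.lookup u).getD []) → (v ∈ visited ∨ v ∈ rest) := by
      intro u hu hgu v hgv hve
      rcases hinv u hu hgu v hgv hve with h | h
      · exact Or.inl h
      · rcases List.mem_cons.mp h with rfl | h
        · exact Or.inl hcur
        · exact Or.inr h
    rw [ih hbv hinv' x]
    refine (flReach_congr ?_ x).symm
    intro y
    rw [List.mem_cons]
    constructor
    · rintro (h | rfl | h)
      · exact Or.inl h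
      · exact Or.inl hcur
      · exact Or.inr h
    · rintro (h | h)
      · exact Or.inl h
      · exact Or.inr (Or.inr h)
  | case3 body visited current rest hsub hv hge hsome hsub2 ih =>
    intro hbv hinv x
    have hbv' : PySem.Set.add (PySem.Set.add body current) current
        = PySem.Set.add visited current := by rw [hbv, fl_add_add]
    have hnv : current ∉ visited := fun hm => hv ((PySem.Set.contains_iff _ _).mpr hm)
    have hinv' : ∀ u ∈ PySem.Set.add visited current, u ≥ header → ∀ v, v ≥ header →
        v ∈ ((g.lookup u).getD []) →
        (v ∈ PySem.Set.add visited current ∨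
         v ∈ rest ++ ((g.lookup current).getD []).filter
           (fun s => decide (s ≥ header) &&
             !(PySem.Set.contains (PySem.Set.add visited current) s))) := by
      intro u hu hgu v hgv hve
      rcases fl_mem_add.mp hu with hu | heq
      · rcases hinv u hu hgu v hgv hve with h | h
        · exact Or.inl (fl_mem_add.mpr (Or.inl h))
        · rcases List.mem_cons.mp h with rfl | h
          · exact Or.inl (fl_mem_add.mpr (Or.inr rfl))
          · exact Or.inr (List.mem_append.mpr (Or.inl h))
      · rw [heq] at hve hgu
        by_cases hmem : v ∈ PySem.Set.add visited current
        · exact Or.inl hmem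
        · refine Or.inr (List.mem_append.mpr (Or.inr ?_))
          rw [List.mem_filter]
          refine ⟨hve, ?_⟩
          simp only [Bool.and_eq_true, decide_eq_true_eq, Bool.not_eq_true']
          refine ⟨hgv, ?_⟩
          cases hc : PySem.Set.contains (PySem.Set.add visited current) v
          · rfl
          · exact absurd ((PySem.Set.contains_iff _ _).mp hc) hmem
    rw [ih hbv' hinv' x]
    refine flReach_absorb ?_ ?_ x
    · -- S ⊆ T
      intro y hy
      rcases hy with hy | hy
      · exact Or.inl (fl_mem_add.mpr (Or.inl hy))
      · rcases List.mem_cons.mp hy with rfl | hy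
        · exact Or.inl (fl_mem_add.mpr (Or.inr rfl))
        · exact Or.inr (List.mem_append.mpr (Or.inl hy))
    · -- T ⊆ Reach S
      intro y hy
      rcases hy with hy | hy
      · rcases fl_mem_add.mp hy with hy | rfl
        · exact .base (Or.inl hy)
        · exact .base (Or.inr List.mem_cons_self)
      · rcases List.mem_append.mp hy with hy | hy
        · exact .base (Or.inr (List.mem_cons_of_mem _ hy))
        · rw [List.mem_filter] at hy
          obtain ⟨hys, hcond⟩ := hy
          simp only [Bool.and_eq_true, decide_eq_true_eq] at hcond
          exact .step (.base (Or.inr List.mem_cons_self)) hge hcond.1 hys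
  | case4 body visited current rest hsub hv hge hsome hsub2 ih =>
    intro hbv hinv x
    have hbv' : PySem.Set.add (PySem.Set.add body current) current
        = PySem.Set.add visited current := by rw [hbv, fl_add_add]
    have hnil : ((g.lookup current).getD []) = [] := by
      cases h : g.lookup current
      · simp
      · rw [h] at hsome; simp at hsome
    have hinv' : ∀ u ∈ PySem.Set.add visited current, u ≥ header → ∀ v, v ≥ header →
        v ∈ ((g.lookup u).getD []) → (v ∈ PySem.Set.add visited current ∨ v ∈ rest) := by
      intro u hu hgu v hgv hve
      rcases fl_mem_add.mp hu with hu | rfl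
      · rcases hinv u hu hgu v hgv hve with h | h
        · exact Or.inl (fl_mem_add.mpr (Or.inl h))
        · rcases List.mem_cons.mp h with rfl | h
          · exact Or.inl (fl_mem_add.mpr (Or.inr rfl))
          · exact Or.inr h
      · rw [hnil] at hve; exact absurd hve (List.not_mem_nil)
    rw [ih hbv' hinv' x]
    refine (flReach_congr ?_ x)
    intro y
    rw [fl_mem_add, List.mem_cons]
    constructor
    · rintro ((h | rfl) | h)
      · exact Or.inl h
      · exact Or.inr (Or.inl rfl)
      · exact Or.inr (Or.inr h)
    · rintro (h | rfl | h)
      · exact Or.inl (Or.inl h)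
      · exact Or.inl (Or.inr rfl)
      · exact Or.inr h
  | case5 body visited current rest hsub hv hge hsub2 ih =>
    intro hbv hinv x
    have hbv' : PySem.Set.add body current = PySem.Set.add visited current := by rw [hbv]
    have hinv' : ∀ u ∈ PySem.Set.add visited current, u ≥ header → ∀ v, v ≥ header →
        v ∈ ((g.lookup u).getD []) → (v ∈ PySem.Set.add visited current ∨ v ∈ rest) := by
      intro u hu hgu v hgv hve
      rcases fl_mem_add.mp hu with hu | rfl
      · rcases hinv u hu hgu v hgv hve with h | h
        · exact Or.inl (fl_mem_add.mpr (Or.inl h))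
        · rcases List.mem_cons.mp h with rfl | h
          · exact Or.inl (fl_mem_add.mpr (Or.inr rfl))
          · exact Or.inr h
      · exact absurd hgu hge
    rw [ih hbv' hinv' x]
    refine (flReach_congr ?_ x)
    intro y
    rw [fl_mem_add, List.mem_cons]
    constructor
    · rintro ((h | rfl) | h)
      · exact Or.inl h
      · exact Or.inr (Or.inl rfl)
      · exact Or.inr (Or.inr h)
    · rintro (h | rfl | h)
      · exact Or.inl (Or.inl h)
      · exact Or.inl (Or.inr rfl)
      · exact Or.inr h

theorem flbLoop_nodup (header : Int) (g : List (Int × List Int)) (univ : Finset Int)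
    (hg : ∀ u v : Int, v ∈ ((g.lookup u).getD []) → v ∈ univ)
    (body visited toVisit : List Int) (hsub : ∀ x ∈ toVisit, x ∈ univ) :
    body.Nodup → (flbLoop header g univ hg body visited toVisit hsub).Nodup := by
  fun_induction flbLoop header g univ hg body visited toVisit hsub with
  | case1 body visited hsub hsub2 => exact id
  | case2 body visited current rest hsub hv hsub2 ih => exact ih
  | case3 body visited current rest hsub hv hge hsome hsub2 ih =>
    exact fun hn => ih (PySem.Set.nodup_add _ _ (PySem.Set.nodup_add _ _ hn))
  | case4 body visited current rest hsub hv hge hsome hsub2 ih =>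
    exact fun hn => ih (PySem.Set.nodup_add _ _ (PySem.Set.nodup_add _ _ hn))
  | case5 body visited current rest hsub hv hge hsub2 ih =>
    exact fun hn => ih (PySem.Set.nodup_add _ _ hn)

theorem mem_flbNew {header : Int} {g : List (Int × List Int)} {body : List Int} {x : Int} :
    x ∈ flbNew header g body ↔
    ∃ u, u ∈ body ∧ u ≥ header ∧ x ≥ header ∧ x ∉ body ∧ x ∈ ((g.lookup u).getD []) := by
  simp only [flbNew, PySem.Set.mem_ofList, List.mem_flatMap, List.mem_filter,
    Bool.and_eq_true, decide_eq_true_eq, Bool.not_eq_true']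
  constructor
  · rintro ⟨u, ⟨hub, hug⟩, hxs, hxg, hxc⟩
    refine ⟨u, hub, hug, hxg, ?_, hxs⟩
    intro hm
    rw [(PySem.Set.contains_iff _ _).mpr hm] at hxc
    simp at hxc
  · rintro ⟨u, hub, hug, hxg, hxb, hxs⟩
    refine ⟨u, ⟨hub, hug⟩, hxs, hxg, ?_⟩
    cases hc : PySem.Set.contains body x
    · rfl
    · exact absurd ((PySem.Set.contains_iff _ _).mp hc) hxb

theorem flbIter_mono (header : Int) (g : List (Int × List Int)) :
    ∀ (n : Nat) (body : List Int), ∀ x ∈ body, x ∈ flbIter header g n body := by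
  intro n
  induction n with
  | zero => intro body x hx; exact hx
  | succ n ih =>
    intro body x hx
    simp only [flbIter]
    split
    · exact hx
    · exact ih _ x ((PySem.Set.mem_union _ _ _).mpr (Or.inl hx))

theorem flbIter_sound (header : Int) (g : List (Int × List Int)) (S : Int → Prop) :
    ∀ (n : Nat) (body : List Int), (∀ x ∈ body, flReach header g S x) →
    ∀ x ∈ flbIter header g n body, flReach header g S x := by
  intro n
  induction n with
  | zero => exact fun body h => h
  | succ n ih =>
    intro body hb x hx
    simp only [flbIter] at hx
    split at hx
    · exact hb x hx
    · refine ih _ ?_ x hx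
      intro y hy
      rcases (PySem.Set.mem_union _ _ _).mp hy with hy | hy
      · exact hb y hy
      · obtain ⟨u, hub, hug, hyg, _, hys⟩ := mem_flbNew.mp hy
        exact .step (hb u hub) hug hyg hys

theorem flbIter_nodup (header : Int) (g : List (Int × List Int)) :
    ∀ (n : Nat) (body : List Int), body.Nodup → (flbIter header g n body).Nodup := by
  intro n
  induction n with
  | zero => exact fun body h => h
  | succ n ih =>
    intro body hb
    simp only [flbIter]
    split
    · exact hb
    · exact ih _ (PySem.Set.nodup_union _ _ hb)

theorem flbIter_fix (header : Int) (g : List (Int × List Int)) (U : Finset Int)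
    (hU : ∀ u v : Int, v ∈ ((g.lookup u).getD []) → v ∈ U) :
    ∀ (n : Nat) (body : List Int), body.toFinset ⊆ U → U.card < n + body.toFinset.card →
    flbNew header g (flbIter header g n body) = [] := by
  intro n
  induction n with
  | zero =>
    intro body hsub hcard
    have := Finset.card_le_card hsub
    omega
  | succ n ih =>
    intro body hsub hcard
    simp only [flbIter]
    split
    · next hemp => exact List.isEmpty_iff.mp hemp
    · next hemp =>
      have hne : flbNew header g body ≠ [] := by
        intro h; rw [h] at hemp; exact hemp rfl
      obtain ⟨v, hv⟩ := List.exists_mem_of_ne_nil _ hne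
      obtain ⟨u, _, _, _, hvb, hvs⟩ := mem_flbNew.mp hv
      have htf : (PySem.Set.union body (flbNew header g body)).toFinset
          = body.toFinset ∪ (flbNew header g body).toFinset := by
        ext y
        simp [PySem.Set.mem_union]
      have hsub' : (PySem.Set.union body (flbNew header g body)).toFinset ⊆ U := by
        rw [htf]
        intro y hy
        rcases Finset.mem_union.mp hy with hy | hy
        · exact hsub (by simpa using hy)
        · rw [List.mem_toFinset] at hy
          obtain ⟨u', _, _, _, _, hys⟩ := mem_flbNew.mp hy
          exact hU u' y hys
      have hlt : body.toFinset.card < (PySem.Set.union body (flbNew header g body)).toFinset.card := by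
        apply Finset.card_lt_card
        rw [htf]
        rw [Finset.ssubset_iff_of_subset Finset.subset_union_left]
        exact ⟨v, Finset.mem_union_right _ (List.mem_toFinset.mpr hv),
          fun hm => hvb (List.mem_toFinset.mp hm)⟩
      exact ih _ hsub' (by omega)

theorem flbNew_empty_closed {header : Int} {g : List (Int × List Int)} {B : List Int}
    (hemp : flbNew header g B = []) :
    ∀ x, flReach header g (fun y => y ∈ B) x → x ∈ B := by
  refine flReach_subset (fun x hx => hx) ?_
  intro u v hu hgu hgv hv
  by_contra hnb
  have : v ∈ flbNew header g B := mem_flbNew.mpr ⟨u, hu, hgu, hgv, hnb, hv⟩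
  rw [hemp] at this
  exact absurd this (List.not_mem_nil)

theorem flSuccs_card_le (g : List (Int × List Int)) :
    (flSuccs g).card ≤ (g.map (fun p => p.2.length)).sum := by
  induction g with
  | nil => simp [flSuccs]
  | cons p rest ih =>
    have h1 : (flSuccs (p :: rest)).card ≤ p.2.toFinset.card + (flSuccs rest).card := by
      simpa [flSuccs] using Finset.card_union_le p.2.toFinset (flSuccs rest)
    have h2 : p.2.toFinset.card ≤ p.2.length := p.2.toFinset_card_le
    simp only [List.map_cons, List.sum_cons]
    omega

theorem find_loop_body_main : ∀ (h b : Int) (cf : List (String × List (Int × List Int))),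
    find_loop_body h b cf = find_loop_body_alt h b cf := by
  intro h b cf
  unfold find_loop_body find_loop_body_alt
  have hb1 : PySem.Set.ofList [b] = [b] :=
    PySem.Set.ofList_eq_self_of_nodup [b] (List.nodup_singleton b)
  rw [hb1]
  set g := (cf.lookup "control_flow_graph").getD [] with hg
  set n := g.length + ((g.map (fun p => p.2.length)).sum) + 1 with hn
  set U : Finset Int := insert b (flSuccs g) with hU
  have hgU : ∀ u v : Int, v ∈ ((g.lookup u).getD []) → v ∈ U :=
    fun u v hv => Finset.mem_insert_of_mem (mem_flSuccs hv)
  -- the two result sets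
  have memA : ∀ x, x ∈ flbLoop h g U hgU [] [] [b]
      (fun x hx => by rw [List.mem_singleton] at hx; exact hx ▸ Finset.mem_insert_self _ _) ↔
      flReach h g (fun y => y ∈ [b]) x := by
    intro x
    rw [flbLoop_mem h g U hgU [] [] [b] _ rfl
      (fun u hu => absurd hu (List.not_mem_nil)) x]
    exact flReach_congr (fun y => by simp) x
  have hfix : flbNew h g (flbIter h g n [b]) = [] := by
    apply flbIter_fix h g U hgU n [b]
    · intro y hy
      rw [List.mem_toFinset, List.mem_singleton] at hy
      exact hy ▸ Finset.mem_insert_self _ _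
    · have h1 : U.card ≤ (flSuccs g).card + 1 := by
        simpa [hU] using Finset.card_insert_le b (flSuccs g)
      have h2 := flSuccs_card_le g
      have h3 : ([b] : List Int).toFinset.card = 1 := by simp
      omega
  have memB : ∀ x, x ∈ flbIter h g n [b] ↔ flReach h g (fun y => y ∈ [b]) x := by
    intro x
    constructor
    · exact flbIter_sound h g _ n [b] (fun y hy => .base hy) x
    · intro hx
      apply flbNew_empty_closed hfix
      exact flReach_mono (fun y hy =>
        (List.mem_singleton.mp hy) ▸ flbIter_mono h g n [b] b (List.mem_singleton_self b)) x hx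
  have hnodA : (flbLoop h g U hgU [] [] [b]
      (fun x hx => by rw [List.mem_singleton] at hx; exact hx ▸ Finset.mem_insert_self _ _)).Nodup :=
    flbLoop_nodup h g U hgU [] [] [b] _ List.nodup_nil
  have hnodB : (flbIter h g n [b]).Nodup := flbIter_nodup h g n [b] (List.nodup_singleton b)
  have hperm : (flbLoop h g U hgU [] [] [b]
      (fun x hx => by rw [List.mem_singleton] at hx; exact hx ▸ Finset.mem_insert_self _ _)).Perm
      (flbIter h g n [b]) := by
    rw [List.perm_ext_iff_of_nodup hnodA hnodB]
    intro x
    rw [memA x, memB x]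
  exact PySem.List.sorted_eq_sorted_of_perm _ _ _ (fun a b hab => hab) hperm

-- ===== VERDICT (by name: the statement is the Claim_ definition above) =====
theorem find_loop_body_spec : Claim_equal_find_loop_body := by
  intro h b cf _ _
  unfold Spec_find_loop_body
  exact find_loop_body_main h b cf
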